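-- pv_equiv track=rewrite | github.com/BRIDGE-Neuroscience/zarr-vectors-py | zarr_vectors/sharding/morton.py | morton_encode
-- ===== SOURCE A (Python) =====
-- def morton_encode(coords: tuple[int, ...]) -> int:
--     """Encode N-dimensional coordinates to a Morton Z-curve code.
--
--     Interleaves bits of each coordinate.  For 3D ``(x, y, z)``,
--     the output bits are ``... z2 y2 x2 z1 y1 x1 z0 y0 x0``.
--
--     Args:
--         coords: Non-negative integer coordinates.
--
--     Returns:
--         Morton code (non-negative integer).
--     """
--     ndim = len(coords)
--     if ndim == 0:
--         return 0
--
--     # Handle negative coordinates by shifting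
--     shifted = []
--     for c in coords:
--         if c < 0:
--             shifted.append(c + (1 << 20))  # shift into positive range
--         else:
--             shifted.append(c)
--
--     # Find max bits needed
--     max_val = max(shifted) if shifted else 0
--     max_bits = max_val.bit_length() if max_val > 0 else 1
--
--     code = 0
--     for bit in range(max_bits):
--         for dim in range(ndim):
--             if shifted[dim] & (1 << bit):
--                 code |= 1 << (bit * ndim + dim)
--
--     return code
-- ===== SOURCE B (Python) =====
-- def morton_encode(coords):
--     """Morton Z-curve encode: per-coordinate bit-spreading instead of a global bit scan."""
--     ndim = len(coords)
--     if ndim == 0: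
--         return 0
--     code = 0
--     for dim, c in enumerate(coords):
--         v = c + (1 << 20) if c < 0 else c
--         spread = 0
--         b = 0
--         while v:
--             if v & 1:
--                 spread |= 1 << (b * ndim)
--             v >>= 1
--             b += 1
--         code |= spread << dim
--     return code
-- ===== Notes on version B (the rewrite author's own statement) =====
-- stated objective: alternative
-- what changed: Replaced the global max-bits scan with its bit x dim double loop by a per-coordinate pass that spreads each coordinate's bits into its own accumulator via a shift-until-zero loop, OR-ing the shifted accumulator into the code.
-- outside the precondition, e.g. on morton_encode((-2097152,)): A returns 0, B does not finish within the time limit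
import Mathlib
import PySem

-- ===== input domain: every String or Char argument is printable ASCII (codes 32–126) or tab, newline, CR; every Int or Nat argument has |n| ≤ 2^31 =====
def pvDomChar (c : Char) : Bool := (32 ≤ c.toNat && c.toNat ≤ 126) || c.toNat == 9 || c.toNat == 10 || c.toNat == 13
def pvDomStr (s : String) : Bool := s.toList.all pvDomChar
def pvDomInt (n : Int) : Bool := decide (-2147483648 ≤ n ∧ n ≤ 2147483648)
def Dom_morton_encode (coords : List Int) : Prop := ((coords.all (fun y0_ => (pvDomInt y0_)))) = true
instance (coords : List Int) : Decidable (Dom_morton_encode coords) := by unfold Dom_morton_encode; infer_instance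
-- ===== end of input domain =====

-- B restructures A's global max-bits bit×dim double loop into one per-coordinate pass
-- that spreads each coordinate's bits into its own accumulator (alternative decomposition,
-- same cost; equivalence proved on Pre_, which keeps every coordinate ≥ -2^20).

-- ===== PORT A =====
def morton_encode (coords : List Int) : Int :=
  let ndim := coords.length
  if ndim = 0 then 0
  else
    -- shifted = []; for c in coords: append (c + (1<<20)) if c < 0 else c
    let shifted : List Int :=
      coords.foldl (fun acc c => acc ++ [((if c < 0 then c + ((1:Int) <<< (20:Nat)) else c) : Int)]) []
    -- max_val = max(shifted) if shifted else 0  (shifted is nonempty here)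
    let max_val : Int := (PySem.List.max? shifted id).getD 0
    -- max_bits = max_val.bit_length() if max_val > 0 else 1
    let max_bits : Nat := if max_val > 0 then PySem.Int.bitLength max_val else 1
    (List.range max_bits).foldl (fun (code : Int) (bit : Nat) =>
      (List.range ndim).foldl (fun (code : Int) (dim : Nat) =>
        if Int.land ((PySem.List.pyGet? shifted (dim : Int)).getD 0) ((1:Int) <<< bit) ≠ 0 then
          Int.lor code ((1:Int) <<< (bit * ndim + dim))
        else code) code) 0

-- ===== PORT B =====
-- inner `while v:` loop of B; the 0 < v guard makes the recursion total — Python's loop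
-- only runs with v ≥ 0 on inputs admitted by Pre_ (it would not terminate for v < 0).
def pvSpread (ndim : Nat) (v : Int) (b : Nat) (spread : Int) : Int :=
  if h : 0 < v then
    pvSpread ndim (v >>> (1:Nat)) (b + 1)
      (if Int.land v 1 ≠ 0 then Int.lor spread ((1:Int) <<< (b * ndim)) else spread)
  else spread
termination_by v.toNat
decreasing_by
  cases v with
  | ofNat m =>
      have hm : 0 < m := by simpa [Int.ofNat_eq_natCast] using h
      show (Int.ofNat (m >>> 1)).toNat < (Int.ofNat m).toNat
      simp only [Int.ofNat_eq_natCast, Int.toNat_natCast, Nat.shiftRight_succ,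
        Nat.shiftRight_zero]
      omega
  | negSucc m => simp at h

def morton_encode_alt (coords : List Int) : Int :=
  let ndim := coords.length
  if ndim = 0 then 0
  else
    (PySem.List.enumerate coords).foldl (fun (code : Int) (p : Int × Int) =>
      let dim : Nat := p.1.toNat   -- enumerate indices are ≥ 0; .toNat is exact here
      let c := p.2
      let v : Int := if c < 0 then c + ((1:Int) <<< (20:Nat)) else c
      Int.lor code ((pvSpread ndim v 0 0) <<< dim)) (0 : Int)

-- ===== PRECONDITION & SPEC =====
-- Pre_ excludes coordinates below -2^20: there A's "+ (1 << 20)" shift leaves the value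
-- negative and A returns an accidental two's-complement encoding, while B's
-- shift-until-zero loop does not terminate.
def Pre_morton_encode (coords : List Int) : Prop :=
  ∀ c ∈ coords, -(2^20 : Int) ≤ c
instance (coords : List Int) : Decidable (Pre_morton_encode coords) := by
  unfold Pre_morton_encode; infer_instance
def pvWitness_morton_encode : List Int := [3, -5, 12]

def Spec_morton_encode (coords : List Int) (out : Int) : Prop := out = morton_encode_alt coords
instance (coords : List Int) (out : Int) : Decidable (Spec_morton_encode coords out) := by unfold Spec_morton_encode; infer_instance

-- ===== CLAIM (what is proved, stated in full; the proofs are below) =====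
def Claim_equal_morton_encode : Prop := ∀ (coords : List Int), Dom_morton_encode coords → Pre_morton_encode coords → Spec_morton_encode coords (morton_encode coords)

-- ===== LEMMAS AND PROOFS =====

-- Nat-level mirror of B's spread loop
def natSpread (v n b spread : Nat) : Nat :=
  if v = 0 then spread
  else natSpread (v >>> 1) n (b + 1)
    (if v &&& 1 ≠ 0 then spread ||| (1 <<< (b * n)) else spread)
termination_by v
decreasing_by
  simp only [Nat.shiftRight_succ, Nat.shiftRight_zero]
  omega

-- Nat-level mirror of A's inner dim loop and outer bit loop
def natInner (ys : List Nat) (bit code : Nat) : Nat :=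
  (List.range ys.length).foldl (fun code dim =>
    if (ys.getD dim 0) &&& (1 <<< bit) ≠ 0 then code ||| (1 <<< (bit * ys.length + dim))
    else code) code

def natA (ys : List Nat) (mb : Nat) : Nat :=
  (List.range mb).foldl (fun code bit => natInner ys bit code) 0

def natB (ys : List Nat) : Nat :=
  ys.zipIdx.foldl (fun code p => code ||| (natSpread p.1 ys.length 0 0 <<< p.2)) 0

-- cast bridges
theorem int_land_cast (m n : Nat) : Int.land (m : Int) (n : Int) = ((m &&& n : Nat) : Int) := rfl
theorem int_lor_cast (m n : Nat) : Int.lor (m : Int) (n : Int) = ((m ||| n : Nat) : Int) := rfl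
theorem int_shr_cast (m s : Nat) : ((m : Int) >>> s) = ((m >>> s : Nat) : Int) := rfl
theorem int_one_shl (k : Nat) : ((1:Int) <<< k) = ((1 <<< k : Nat) : Int) := by
  simp [Int.shiftLeft_eq, Nat.one_shiftLeft]

-- pvSpread is the cast of natSpread on nonnegative inputs
theorem pvSpread_cast (v : Nat) : ∀ (n b spread : Nat),
    pvSpread n (v : Int) b (spread : Int) = ((natSpread v n b spread : Nat) : Int) := by
  induction v using Nat.strong_induction_on with
  | _ v ih =>
    intro n b spread
    rw [pvSpread, natSpread]
    by_cases hv : v = 0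
    · simp [hv]
    · have hpos : (0:Int) < (v:Int) := by exact_mod_cast Nat.pos_of_ne_zero hv
      have hlt : v >>> 1 < v := by
        simp only [Nat.shiftRight_succ, Nat.shiftRight_zero]; omega
      rw [dif_pos hpos, if_neg hv]
      have h1 : ((v:Int) >>> (1:Nat)) = ((v >>> 1 : Nat) : Int) := int_shr_cast v 1
      have h2 : Int.land (v:Int) 1 = ((v &&& 1 : Nat) : Int) := int_land_cast v 1
      rw [h1, h2, int_one_shl, int_lor_cast]
      have hcond : (((v &&& 1 : Nat) : Int) ≠ 0) ↔ ((v &&& 1) ≠ 0) := by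
        exact_mod_cast Iff.rfl
      by_cases hc : (v &&& 1) ≠ 0
      · rw [if_pos (hcond.mpr hc), if_pos hc, ih _ hlt]
      · rw [if_neg (fun hh => hc (hcond.mp hh)), if_neg hc, ih _ hlt]

-- generic: testBit of an OR-accumulating fold
theorem testBit_orFold {α : Type} (l : List α) (g : α → Nat) (code k : Nat) :
    ((l.foldl (fun code x => code ||| g x) code).testBit k = true)
      ↔ (code.testBit k = true ∨ ∃ x ∈ l, (g x).testBit k = true) := by
  induction l generalizing code with
  | nil => simp
  | cons a t ih => simp [List.foldl_cons, ih, or_assoc]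

-- generic: testBit of a guarded single-bit OR-accumulating fold
theorem testBit_orFoldIf {α : Type} (l : List α) (p : α → Prop) [DecidablePred p]
    (f : α → Nat) (code k : Nat) :
    ((l.foldl (fun code x => if p x then code ||| (1 <<< f x) else code) code).testBit k = true)
      ↔ (code.testBit k = true ∨ ∃ x ∈ l, p x ∧ f x = k) := by
  induction l generalizing code with
  | nil => simp
  | cons a t ih =>
    rw [List.foldl_cons]
    by_cases h : p a
    · rw [if_pos h, ih]
      have hstep : ((code ||| 1 <<< f a).testBit k = true) ↔ (code.testBit k = true ∨ f a = k) := by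
        simp [Nat.testBit_lor, Nat.one_shiftLeft, Nat.testBit_two_pow]
      rw [hstep]
      constructor
      · rintro ((h1 | h1) | ⟨x, hx, hpx, hfx⟩)
        · exact Or.inl h1
        · exact Or.inr ⟨a, List.mem_cons_self .., h, h1⟩
        · exact Or.inr ⟨x, List.mem_cons_of_mem _ hx, hpx, hfx⟩
      · rintro (h1 | ⟨x, hx, hpx, hfx⟩)
        · exact Or.inl (Or.inl h1)
        · rcases List.mem_cons.mp hx with rfl | hx'
          · exact Or.inl (Or.inr hfx)
          · exact Or.inr ⟨x, hx', hpx, hfx⟩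
    · rw [if_neg h, ih]
      constructor
      · rintro (h1 | ⟨x, hx, hpx, hfx⟩)
        · exact Or.inl h1
        · exact Or.inr ⟨x, List.mem_cons_of_mem _ hx, hpx, hfx⟩
      · rintro (h1 | ⟨x, hx, hpx, hfx⟩)
        · exact Or.inl h1
        · rcases List.mem_cons.mp hx with rfl | hx'
          · exact absurd hpx h
          · exact Or.inr ⟨x, hx', hpx, hfx⟩

theorem natSpread_testBit (v : Nat) : ∀ (n b spread k : Nat), 0 < n →
    ((natSpread v n b spread).testBit k = true
      ↔ (spread.testBit k = true ∨ (n ∣ k ∧ b ≤ k / n ∧ v.testBit (k / n - b) = true))) := by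
  induction v using Nat.strong_induction_on with
  | _ v ih =>
    intro n b spread k hn
    rw [natSpread]
    by_cases hv : v = 0
    · simp [hv]
    · rw [if_neg hv]
      have hlt : v >>> 1 < v := by
        simp only [Nat.shiftRight_succ, Nat.shiftRight_zero]; omega
      rw [ih _ hlt n (b+1) _ k hn]
      have hsh : (v >>> 1).testBit (k / n - (b+1)) = v.testBit (1 + (k / n - (b+1))) :=
        Nat.testBit_shiftRight ..
      have hand : v &&& 1 = v % 2 := Nat.and_one_is_mod v
      have hs' : ((if v &&& 1 ≠ 0 then spread ||| 1 <<< (b * n) else spread).testBit k = true)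
          ↔ (spread.testBit k = true ∨ (v.testBit 0 = true ∧ b * n = k)) := by
        by_cases hc : v % 2 = 1
        · have hv0 : v.testBit 0 = true := by
            simp only [Nat.testBit_zero, decide_eq_true_eq]; omega
          simp [Nat.and_one_is_mod, hc, Nat.testBit_lor, Nat.one_shiftLeft,
            Nat.testBit_two_pow, hv0]
        · have hm0 : v % 2 = 0 := by omega
          have hv0 : v.testBit 0 = false := by
            simp only [Nat.testBit_zero, decide_eq_false_iff_not]; omega
          simp [Nat.and_one_is_mod, hm0, hv0]
      rw [hs', hsh]
      constructor
      · rintro ((h | ⟨h0, hk⟩) | ⟨h1, h2, h3⟩)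
        · exact Or.inl h
        · have hdiv : k / n = b := by rw [← hk, Nat.mul_div_cancel _ hn]
          refine Or.inr ⟨⟨b, by rw [← hk, Nat.mul_comm]⟩, by omega, ?_⟩
          simpa [show k / n - b = 0 by omega] using h0
        · refine Or.inr ⟨h1, by omega, ?_⟩
          rw [show 1 + (k / n - (b+1)) = k / n - b by omega] at h3
          exact h3
      · rintro (h | ⟨h1, h2, h3⟩)
        · exact Or.inl (Or.inl h)
        · by_cases hb : b = k / n
          · obtain ⟨t, ht⟩ := h1
            have h4 : k / n = t := by rw [ht, Nat.mul_div_cancel_left _ hn]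
            refine Or.inl (Or.inr ⟨?_, by rw [show b = t by omega, ht, Nat.mul_comm]⟩)
            simpa [show k / n - b = 0 by omega] using h3
          · refine Or.inr ⟨h1, by omega, ?_⟩
            rw [show 1 + (k / n - (b+1)) = k / n - b by omega]
            exact h3

theorem natInner_testBit (ys : List Nat) (bit code k : Nat) :
    ((natInner ys bit code).testBit k = true
      ↔ (code.testBit k = true ∨
          ∃ dim, dim < ys.length ∧ (ys.getD dim 0).testBit bit = true ∧ k = bit * ys.length + dim)) := by
  rw [natInner, testBit_orFoldIf]
  have hcond : ∀ dim : Nat, ((ys.getD dim 0) &&& (1 <<< bit) ≠ 0) ↔ (ys.getD dim 0).testBit bit = true := by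
    intro dim
    rw [Nat.one_shiftLeft, Nat.and_two_pow]
    cases hb : (ys.getD dim 0).testBit bit
    · simp
    · simp [Nat.pow_eq_zero]
  constructor
  · rintro (h | ⟨dim, hdim, hp, hf⟩)
    · exact Or.inl h
    · exact Or.inr ⟨dim, List.mem_range.mp hdim, (hcond dim).mp hp, hf.symm⟩
  · rintro (h | ⟨dim, hdim, hp, hf⟩)
    · exact Or.inl h
    · exact Or.inr ⟨dim, List.mem_range.mpr hdim, (hcond dim).mpr hp, hf.symm⟩

theorem natA_testBit (ys : List Nat) (mb k : Nat) :
    ((natA ys mb).testBit k = true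
      ↔ ∃ bit, bit < mb ∧ ∃ dim, dim < ys.length ∧
          (ys.getD dim 0).testBit bit = true ∧ k = bit * ys.length + dim) := by
  induction mb with
  | zero => simp [natA]
  | succ m ih =>
    have hstep : natA ys (m+1) = natInner ys m (natA ys m) := by
      rw [natA, natA, List.range_succ, List.foldl_append]
      rfl
    rw [hstep, natInner_testBit, ih]
    constructor
    · rintro (⟨bit, hb, rest⟩ | ⟨dim, h⟩)
      · exact ⟨bit, by omega, rest⟩
      · exact ⟨m, by omega, dim, h⟩
    · rintro ⟨bit, hb, dim, hdim, htb, hk⟩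
      by_cases hbm : bit = m
      · subst hbm
        exact Or.inr ⟨dim, hdim, htb, hk⟩
      · exact Or.inl ⟨bit, by omega, dim, hdim, htb, hk⟩

theorem natB_testBit (ys : List Nat) (k : Nat) (hn : 0 < ys.length) :
    ((natB ys).testBit k = true
      ↔ ∃ dim, dim < ys.length ∧ dim ≤ k ∧ ys.length ∣ (k - dim) ∧
          (ys.getD dim 0).testBit ((k - dim) / ys.length) = true) := by
  rw [natB, testBit_orFold]
  constructor
  · rintro (h0 | ⟨p, hp, htb⟩)
    · simp at h0
    · obtain ⟨y, i⟩ := p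
      obtain ⟨-, hi, hy⟩ := List.mem_zipIdx hp
      have hy' : y = ys[i] := by simpa using hy
      rw [Nat.testBit_shiftLeft, Bool.and_eq_true, decide_eq_true_eq] at htb
      obtain ⟨hge, htb⟩ := htb
      rw [natSpread_testBit _ _ _ _ _ hn] at htb
      rcases htb with h0 | ⟨hdvd, -, htb⟩
      · simp at h0
      · refine ⟨i, by omega, hge, hdvd, ?_⟩
        rw [List.getD_eq_getElem _ _ (by omega), ← hy']
        simpa using htb
  · rintro ⟨dim, hdim, hle, hdvd, htb⟩
    refine Or.inr ⟨(ys[dim], dim), ?_, ?_⟩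
    · rw [List.mem_zipIdx_iff_getElem?]
      simp [List.getElem?_eq_getElem hdim]
    · rw [Nat.testBit_shiftLeft, Bool.and_eq_true, decide_eq_true_eq]
      refine ⟨hle, ?_⟩
      rw [natSpread_testBit _ _ _ _ _ hn]
      refine Or.inr ⟨hdvd, Nat.zero_le _, ?_⟩
      rw [List.getD_eq_getElem _ _ hdim] at htb
      simpa using htb

theorem natA_eq_natB (ys : List Nat) (mb : Nat) (hn : 0 < ys.length)
    (hb : ∀ y ∈ ys, y < 2 ^ mb) : natA ys mb = natB ys := by
  apply Nat.eq_of_testBit_eq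
  intro k
  rw [Bool.eq_iff_iff, natA_testBit, natB_testBit _ _ hn]
  constructor
  · rintro ⟨bit, hbit, dim, hdim, htb, hk⟩
    have hkd : k - dim = bit * ys.length := by omega
    refine ⟨dim, hdim, by omega, ⟨bit, by rw [hkd, Nat.mul_comm]⟩, ?_⟩
    rw [hkd, Nat.mul_div_cancel _ hn]
    exact htb
  · rintro ⟨dim, hdim, hle, ⟨t, ht⟩, htb⟩
    have hdivt : (k - dim) / ys.length = t := by
      rw [ht, Nat.mul_div_cancel_left _ hn]
    have ht' : k - dim = t * ys.length := by rw [ht, Nat.mul_comm]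
    refine ⟨t, ?_, dim, hdim, by rwa [hdivt] at htb, by omega⟩
    by_contra hge
    have h2 : ys.getD dim 0 < 2 ^ t := by
      calc ys.getD dim 0 < 2 ^ mb := hb _ (by rw [List.getD_eq_getElem _ _ hdim]; exact List.getElem_mem _)
        _ ≤ 2 ^ t := Nat.pow_le_pow_right (by omega) (by omega)
    rw [hdivt, Nat.testBit_lt_two_pow h2] at htb
    exact absurd htb (by simp)

-- cast bridge: A's inner dim loop over Int equals the cast of the Nat inner loop
theorem castInner (ys : List Nat) (n bit : Nat) (l : List Nat) : ∀ (code : Nat),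
    l.foldl (fun (code : Int) (dim : Nat) =>
      if Int.land ((PySem.List.pyGet? (ys.map (fun (y : Nat) => (y : Int))) (dim : Int)).getD 0)
            ((1:Int) <<< bit) ≠ 0 then
        Int.lor code ((1:Int) <<< (bit * n + dim))
      else code) (code : Int)
    = ((l.foldl (fun code dim =>
        if (ys.getD dim 0) &&& (1 <<< bit) ≠ 0 then code ||| (1 <<< (bit * n + dim))
        else code) code : Nat) : Int) := by
  induction l with
  | nil => intro code; simp
  | cons a t ih =>
    intro code
    have hget : ((PySem.List.pyGet? (ys.map (fun (y : Nat) => (y : Int))) (a : Int)).getD 0)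
        = ((ys.getD a 0 : Nat) : Int) := by
      rw [PySem.List.pyGet?_natCast]
      cases h : ys[a]? with
      | none => simp [List.getD, h, List.getElem?_map]
      | some y => simp [List.getD, h, List.getElem?_map]
    have hhead : (if Int.land ((PySem.List.pyGet? (ys.map (fun (y : Nat) => (y : Int))) (a : Int)).getD 0)
            ((1:Int) <<< bit) ≠ 0 then
          Int.lor (code : Int) ((1:Int) <<< (bit * n + a)) else (code : Int))
        = (((if (ys.getD a 0) &&& (1 <<< bit) ≠ 0 then code ||| (1 <<< (bit * n + a)) else code) : Nat) : Int) := by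
      rw [hget, int_one_shl, int_land_cast]
      by_cases hc : (ys.getD a 0) &&& (1 <<< bit) ≠ 0
      · rw [if_pos (by exact_mod_cast hc), if_pos hc, int_one_shl, int_lor_cast]
      · rw [if_neg (fun h => hc (by exact_mod_cast h)), if_neg hc]
    rw [List.foldl_cons, List.foldl_cons, hhead, ih]

-- cast bridge: A's whole double loop equals the cast of natA's loop
theorem castA (ys : List Nat) (l : List Nat) : ∀ (code : Nat),
    l.foldl (fun (code : Int) (bit : Nat) =>
      (List.range ys.length).foldl (fun (code : Int) (dim : Nat) =>
        if Int.land ((PySem.List.pyGet? (ys.map (fun (y : Nat) => (y : Int))) (dim : Int)).getD 0)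
              ((1:Int) <<< bit) ≠ 0 then
          Int.lor code ((1:Int) <<< (bit * ys.length + dim))
        else code) code) (code : Int)
    = ((l.foldl (fun code bit => natInner ys bit code) code : Nat) : Int) := by
  induction l with
  | nil => intro code; simp
  | cons a t ih =>
    intro code
    rw [List.foldl_cons, List.foldl_cons, castInner ys ys.length a (List.range ys.length) code, ih]
    rfl

-- cast bridge: B's enumerate loop equals the cast of natB's zipIdx loop
theorem castB (n : Nat) (cs : List Int) (hcs : ∀ c ∈ cs, 0 ≤ (if c < 0 then c + ((1:Int) <<< (20:Nat)) else c)) :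
    ∀ (s code : Nat),
    (PySem.List.enumerate cs (s : Int)).foldl (fun (code : Int) (p : Int × Int) =>
        Int.lor code ((pvSpread n (if p.2 < 0 then p.2 + ((1:Int) <<< (20:Nat)) else p.2) 0 0) <<< p.1.toNat))
      (code : Int)
    = (((cs.map (fun c => (if c < 0 then c + ((1:Int) <<< (20:Nat)) else c).toNat)).zipIdx s).foldl
        (fun code p => code ||| (natSpread p.1 n 0 0 <<< p.2)) code : Nat) := by
  induction cs with
  | nil => intro s code; simp [PySem.List.enumerate]
  | cons c t ih =>
    intro s code
    have hc0 : 0 ≤ (if c < 0 then c + ((1:Int) <<< (20:Nat)) else c) := hcs c (List.mem_cons_self ..)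
    have ht : ∀ c ∈ t, 0 ≤ (if c < 0 then c + ((1:Int) <<< (20:Nat)) else c) :=
      fun x hx => hcs x (List.mem_cons_of_mem _ hx)
    rw [PySem.List.enumerate_cons, List.map_cons, List.zipIdx_cons, List.foldl_cons, List.foldl_cons]
    have hv : (if c < 0 then c + ((1:Int) <<< (20:Nat)) else c)
        = (((if c < 0 then c + ((1:Int) <<< (20:Nat)) else c).toNat : Nat) : Int) :=
      (Int.toNat_of_nonneg hc0).symm
    rw [show (pvSpread n (if c < 0 then c + ((1:Int) <<< (20:Nat)) else c) 0 0)
          = ((natSpread (if c < 0 then c + ((1:Int) <<< (20:Nat)) else c).toNat n 0 0 : Nat) : Int) by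
        rw [hv]
        exact_mod_cast pvSpread_cast _ n 0 0]
    have hsimp : ((s:Int) + 1) = ((s + 1 : Nat) : Int) := by push_cast; ring
    rw [show ((s:Int), c).1.toNat = s from Int.toNat_natCast s,
      show ((natSpread (if c < 0 then c + ((1:Int) <<< (20:Nat)) else c).toNat n 0 0 : Nat) : Int) <<< s
          = (((natSpread (if c < 0 then c + ((1:Int) <<< (20:Nat)) else c).toNat n 0 0 <<< s : Nat)) : Int) from
        (Int.natCast_shiftLeft _ _),
      int_lor_cast, hsimp, ih ht (s+1)]

-- ===== VERDICT (by name: the statement is the Claim_ definition above) =====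
theorem morton_encode_spec : Claim_equal_morton_encode := by
  intro coords hdom hpre
  unfold Spec_morton_encode
  by_cases hnil : coords = []
  · subst hnil; rfl
  · have hlen0 : coords.length ≠ 0 := fun h => hnil (List.length_eq_zero_iff.mp h)
    have hp20 : ((2:Int)^20) = 1048576 := by norm_num
    have h20 : ((1:Int) <<< (20:Nat)) = 1048576 := by decide
    have hf : ∀ c ∈ coords, 0 ≤ (if c < 0 then c + ((1:Int) <<< (20:Nat)) else c) := by
      intro c hc
      have hc' := hpre c hc
      rw [h20]
      rw [hp20] at hc'
      split_ifs <;> omega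
    simp only [morton_encode, morton_encode_alt]
    rw [if_neg hlen0, if_neg hlen0]
    set ys := coords.map (fun c => ((if c < 0 then c + ((1:Int) <<< (20:Nat)) else c)).toNat) with hys
    have hyslen : ys.length = coords.length := by simp [hys]
    have hshift : List.foldl (fun acc c => acc ++ [if c < 0 then c + ((1:Int) <<< (20:Nat)) else c])
        ([] : List Int) coords = ys.map (fun (y : Nat) => (y : Int)) := by
      rw [PySem.List.foldl_append_singleton_eq_map, hys, List.map_map]
      simp only [List.nil_append]
      exact List.map_congr_left fun c hc => (Int.toNat_of_nonneg (hf c hc)).symm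
    rw [hshift]
    obtain ⟨m, hm⟩ : ∃ m, PySem.List.max? (ys.map (fun (y : Nat) => (y : Int))) id = some m := by
      cases h : PySem.List.max? (ys.map (fun (y : Nat) => (y : Int))) id with
      | none =>
          exfalso
          have := (PySem.List.max?_eq_none_iff _ _).mp h
          apply hlen0
          have : ys.length = 0 := by simp_all
          omega
      | some m => exact ⟨m, rfl⟩
    rw [hm]
    simp only [Option.getD_some]
    have hmmem := PySem.List.max?_mem hm
    have hmax := PySem.List.max?_isMax hm
    have hm0 : 0 ≤ m := by
      obtain ⟨y, -, rfl⟩ := List.mem_map.mp hmmem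
      exact Int.natCast_nonneg y
    set mb := (if m > 0 then PySem.Int.bitLength m else 1) with hmb
    have hbound : ∀ y ∈ ys, y < 2 ^ mb := by
      intro y hy
      have hle : (y : Int) ≤ m := by
        simpa using hmax _ (List.mem_map_of_mem hy)
      by_cases hmp : m > 0
      · have h1 : y ≤ m.natAbs := by omega
        have h2 := PySem.Int.lt_two_pow_bitLength m
        rw [hmb, if_pos hmp]
        omega
      · have hy0 : y = 0 := by omega
        rw [hmb, if_neg hmp, hy0]
        omega
    rw [show coords.length = ys.length from hyslen.symm]
    have hA := castA ys (List.range mb) 0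
    simp only [Nat.cast_zero] at hA
    rw [hA]
    have hB := castB ys.length coords hf 0 0
    simp only [Nat.cast_zero] at hB
    rw [← hys] at hB
    rw [hB]
    exact congrArg _ (natA_eq_natB ys mb (by omega) hbound)
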